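-- pv_equiv track=rewrite | github.com/LincolnRychecky/CSCI-1300-Coursework | Hmwk9/Prac4.py | hash_func
-- ===== SOURCE A (Python) =====
-- def hash_func(inputString):
--     i = 0
--     hashValue = 0
--     while i < len(inputString):
--         if inputString[i] == "a":
--             hashValue += (len(inputString) + 1)
--         elif inputString[i] == "b":
--             hashValue += (len(inputString) + 2)
--         elif inputString[i] == "c":
--             hashValue += (len(inputString) + 3)
--         elif i >= 0:
--             hashValue += 1
--
--         i+=1
--
--     return hashValue%10
-- ===== SOURCE B (Python) =====
-- def hash_func(inputString):
--     n = len(inputString)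
--     ca = inputString.count("a")
--     cb = inputString.count("b")
--     cc = inputString.count("c")
--     return (ca * (n + 1) + cb * (n + 2) + cc * (n + 3) + (n - ca - cb - cc)) % 10
-- ===== Notes on version B (the rewrite author's own statement) =====
-- stated objective: simpler
-- what changed: Replaces the index-driven while loop with per-character branching by three str.count calls and one closed-form arithmetic expression mod 10.
import Mathlib
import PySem

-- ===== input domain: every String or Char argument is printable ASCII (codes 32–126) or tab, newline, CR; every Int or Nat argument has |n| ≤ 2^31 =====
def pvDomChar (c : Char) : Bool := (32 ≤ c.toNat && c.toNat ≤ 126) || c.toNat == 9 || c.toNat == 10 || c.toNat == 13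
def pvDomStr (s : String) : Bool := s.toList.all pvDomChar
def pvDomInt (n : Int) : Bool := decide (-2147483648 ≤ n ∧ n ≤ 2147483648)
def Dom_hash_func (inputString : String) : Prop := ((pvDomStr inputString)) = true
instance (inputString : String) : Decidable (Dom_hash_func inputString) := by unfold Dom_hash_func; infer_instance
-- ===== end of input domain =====

-- B replaces A's index-driven branching loop by three character counts and one closed-form expression mod 10 (simpler).


-- ===== PORT A =====
-- while i < len(s): branch on s[i]; transliterated as structural recursion on the tail, carrying i and hashValue
def hashLoopA (n : Int) (i : Int) (acc : Int) : List Char → Int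
  | [] => acc
  | c :: rest =>
    hashLoopA n (i + 1)
      (if c = 'a' then acc + (n + 1)
       else if c = 'b' then acc + (n + 2)
       else if c = 'c' then acc + (n + 3)
       else if i ≥ 0 then acc + 1
       else acc) rest

def hash_func (inputString : String) : Int :=
  let n : Int := PySem.Str.len inputString
  PySem.Int.mod (hashLoopA n 0 0 inputString.toList) 10

-- ===== PORT B =====
def hash_func_alt (inputString : String) : Int :=
  let n : Int := PySem.Str.len inputString
  let ca : Int := inputString.toList.count 'a'
  let cb : Int := inputString.toList.count 'b'
  let cc : Int := inputString.toList.count 'c'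
  PySem.Int.mod (ca * (n + 1) + cb * (n + 2) + cc * (n + 3) + (n - ca - cb - cc)) 10

-- ===== PRECONDITION & SPEC =====
def Spec_hash_func (inputString : String) (out : Int) : Prop := out = hash_func_alt inputString
instance (inputString : String) (out : Int) : Decidable (Spec_hash_func inputString out) := by unfold Spec_hash_func; infer_instance

-- ===== CLAIM (what is proved, stated in full; the proofs are below) =====
def Claim_equal_hash_func : Prop := ∀ (inputString : String), Dom_hash_func inputString → Spec_hash_func inputString (hash_func inputString)

-- ===== LEMMAS AND PROOFS =====
lemma hashLoopA_eq (n : Int) (cs : List Char) (i acc : Int) (hi : 0 ≤ i) :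
    hashLoopA n i acc cs =
      acc + (cs.count 'a') * (n + 1) + (cs.count 'b') * (n + 2) + (cs.count 'c') * (n + 3)
        + ((cs.length : Int) - cs.count 'a' - cs.count 'b' - cs.count 'c') := by
  induction cs generalizing i acc with
  | nil => simp [hashLoopA]
  | cons c rest ih =>
    simp only [hashLoopA]
    rw [ih _ _ (by omega)]
    by_cases ha : c = 'a'
    · simp [ha]; ring
    · by_cases hb : c = 'b'
      · simp [hb]; ring
      · by_cases hc : c = 'c'
        · simp [hc]; ring
        · have : i ≥ 0 := hi
          simp [ha, hb, hc, this]
          ring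

-- ===== VERDICT (by name: the statement is the Claim_ definition above) =====
theorem hash_func_spec : Claim_equal_hash_func := by
  intro s _
  show hash_func s = hash_func_alt s
  simp only [hash_func, hash_func_alt]
  rw [hashLoopA_eq _ _ _ _ le_rfl]
  simp only [PySem.Str.len_eq]
  congr 1
  ring
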